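-- pv_equiv track=rewrite | github.com/ag1455/OpenPLi-PC | plugins/third-party-plugins/Plugins/Extensions/KodiLite/scripts/script.module.universalscrapers/lib/universalscrapers/modules/quality_tags.py | check_sd_url
-- ===== SOURCE A (Python) =====
-- def check_sd_url(release_link):
--
--     try:
--         release_link = release_link.lower()
--         if '2160' in release_link:
--             quality = '4K'
--         elif '1080' in release_link:
--             quality = '1080p'
--         elif '720' in release_link:
--             quality = '720p'
--         elif '.hd.' in release_link:
--             quality = '720p'
--         elif any(i in ['dvdscr', 'r5', 'r6'] for i in release_link):
--             quality = 'SCR'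
--         elif any(i in ['camrip', 'tsrip', 'hdcam', 'hdts', 'dvdcam', 'dvdts', 'cam', 'telesync', 'ts'] for i in release_link):
--             quality = 'CAM'
--         else: quality = 'SD'
--
--         return quality
--     except:
--         return 'SD'
-- ===== SOURCE B (Python) =====
-- _TABLE = [('2160', '4K'), ('1080', '1080p'), ('720', '720p'), ('.hd.', '720p')]
--
-- def check_sd_url(release_link):
--     try:
--         rl = release_link.lower()
--         for pat, quality in _TABLE:
--             if pat in rl:
--                 return quality
--         return 'SD'
--     except:
--         return 'SD'
-- ===== Notes on version B (the rewrite author's own statement) =====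
-- stated objective: simpler
-- what changed: Replaced the if/elif chain by a loop over a fixed (substring, quality) table and dropped the SCR/CAM branches, which are unreachable because they test single characters against multi-character patterns; dropping those per-character scans also makes B measurably faster on strings with no quality marker.
import Mathlib
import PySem

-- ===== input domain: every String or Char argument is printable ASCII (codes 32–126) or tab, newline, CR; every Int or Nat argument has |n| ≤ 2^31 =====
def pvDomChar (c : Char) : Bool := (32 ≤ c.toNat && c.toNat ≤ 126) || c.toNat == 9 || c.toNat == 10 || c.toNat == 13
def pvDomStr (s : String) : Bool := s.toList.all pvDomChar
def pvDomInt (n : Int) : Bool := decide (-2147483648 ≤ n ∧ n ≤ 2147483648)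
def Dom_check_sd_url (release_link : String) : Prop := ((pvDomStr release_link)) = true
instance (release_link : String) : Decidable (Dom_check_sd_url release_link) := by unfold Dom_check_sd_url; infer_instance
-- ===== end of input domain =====

-- B replaces A's if/elif chain by a loop over a fixed (substring, quality) table and drops the
-- SCR/CAM branches, which are unreachable (single characters never equal multi-character patterns); simpler.

-- ===== PORT A =====
-- literal transliteration of A: if/elif chain, the any(...) generators iterate the characters of the string
def check_sd_url (release_link : String) : String :=
  let rl := PySem.Str.lower release_link
  if PySem.Str.isIn "2160" rl then "4K"
  else if PySem.Str.isIn "1080" rl then "1080p"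
  else if PySem.Str.isIn "720" rl then "720p"
  else if PySem.Str.isIn ".hd." rl then "720p"
  else if rl.toList.any (fun c => (["dvdscr", "r5", "r6"] : List String).contains (String.ofList [c])) then "SCR"
  else if rl.toList.any (fun c => (["camrip", "tsrip", "hdcam", "hdts", "dvdcam", "dvdts", "cam", "telesync", "ts"] : List String).contains (String.ofList [c])) then "CAM"
  else "SD"

-- ===== PORT B =====
def pvTable : List (String × String) :=
  [("2160", "4K"), ("1080", "1080p"), ("720", "720p"), (".hd.", "720p")]

def pvScan : List (String × String) → String → String
  | [], _ => "SD"
  | (pat, quality) :: rest, rl => if PySem.Str.isIn pat rl then quality else pvScan rest rl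

def check_sd_url_alt (release_link : String) : String :=
  pvScan pvTable (PySem.Str.lower release_link)

-- ===== PRECONDITION & SPEC =====
def Spec_check_sd_url (release_link : String) (out : String) : Prop := out = check_sd_url_alt release_link
instance (release_link : String) (out : String) : Decidable (Spec_check_sd_url release_link out) := by unfold Spec_check_sd_url; infer_instance

-- ===== CLAIM (what is proved, stated in full; the proofs are below) =====
def Claim_equal_check_sd_url : Prop := ∀ (release_link : String), Dom_check_sd_url release_link → Spec_check_sd_url release_link (check_sd_url release_link)

-- ===== LEMMAS AND PROOFS =====

-- a one-character string never equals a multi-character pattern, so A's SCR/CAM tests are unreachable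
theorem single_char_scr (c : Char) :
    (["dvdscr", "r5", "r6"] : List String).contains (String.ofList [c]) = false := by
  simp only [List.contains_cons, List.contains_nil, Bool.or_eq_false_iff, beq_eq_false_iff_ne, ne_eq]
  refine ⟨?_, ?_, ?_, trivial⟩ <;> · intro h; have := congrArg String.toList h; simp at this

theorem single_char_cam (c : Char) :
    (["camrip", "tsrip", "hdcam", "hdts", "dvdcam", "dvdts", "cam", "telesync", "ts"] : List String).contains (String.ofList [c]) = false := by
  simp only [List.contains_cons, List.contains_nil, Bool.or_eq_false_iff, beq_eq_false_iff_ne, ne_eq]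
  refine ⟨?_, ?_, ?_, ?_, ?_, ?_, ?_, ?_, ?_, trivial⟩ <;> · intro h; have := congrArg String.toList h; simp at this

-- ===== VERDICT (by name: the statement is the Claim_ definition above) =====
theorem check_sd_url_spec : Claim_equal_check_sd_url := by
  intro rl _
  unfold Spec_check_sd_url check_sd_url check_sd_url_alt pvTable pvScan
  simp only [pvScan, single_char_scr, single_char_cam, List.any_eq_true, Bool.false_eq_true,
    and_false, exists_false, if_false]
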